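-- pv_equiv track=rewrite | github.com/darisvelovic11/PythonVjezbe | Treci cas/drugizadatak.py | izracunaj_inventar
-- ===== SOURCE A (Python) =====
-- def izracunaj_inventar(lista_predmeta):
--     ukupna_tezina = 0
--     najvrijedniji = lista_predmeta[0]
--     max_vrijednost = najvrijedniji["vrijednost"]
--
--     for predmet in lista_predmeta:
--         ukupna_tezina+=predmet["tezina"]
--
--         if predmet["vrijednost"]> max_vrijednost:
--             max_vrijednost = predmet["vrijednost"]
--             najvrijedniji = predmet
--     return ukupna_tezina , najvrijedniji
-- ===== SOURCE B (Python) =====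
-- def izracunaj_inventar(lista_predmeta):
--     # divide and conquer: split in half, solve each half, merge
--     if len(lista_predmeta) <= 1:
--         p = lista_predmeta[0]
--         return p["tezina"], p
--     mid = len(lista_predmeta) // 2
--     t1, b1 = izracunaj_inventar(lista_predmeta[:mid])
--     t2, b2 = izracunaj_inventar(lista_predmeta[mid:])
--     return t1 + t2, b2 if b1["vrijednost"] < b2["vrijednost"] else b1
-- ===== Notes on version B (the rewrite author's own statement) =====
-- stated objective: alternative
-- what changed: Replaces A's single left-to-right accumulating loop by a divide-and-conquer recursion: the list is split in half, each half is solved recursively, and the (weight-sum, first-maximum item) results are merged; first-maximum is preserved because the left half's best wins ties.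
import Mathlib
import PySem

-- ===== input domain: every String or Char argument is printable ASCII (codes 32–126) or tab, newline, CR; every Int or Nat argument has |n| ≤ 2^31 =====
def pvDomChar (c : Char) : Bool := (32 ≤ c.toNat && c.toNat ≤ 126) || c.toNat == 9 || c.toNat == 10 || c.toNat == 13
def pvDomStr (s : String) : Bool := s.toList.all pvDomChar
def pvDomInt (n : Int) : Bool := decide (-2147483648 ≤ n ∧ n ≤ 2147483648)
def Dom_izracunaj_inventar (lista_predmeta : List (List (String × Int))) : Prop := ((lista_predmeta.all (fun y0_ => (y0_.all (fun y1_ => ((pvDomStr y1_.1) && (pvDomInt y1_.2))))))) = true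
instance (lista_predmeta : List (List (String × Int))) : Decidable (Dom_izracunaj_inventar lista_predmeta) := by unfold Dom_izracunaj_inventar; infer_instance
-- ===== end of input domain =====

-- B replaces A's single accumulating loop by a divide-and-conquer recursion (split in half, merge); same linear cost.


-- ===== PORT A =====
-- p["k"] on the association-list dict; total via default 0, exact under Pre_ (both keys present)
def pvGet (p : List (String × Int)) (k : String) : Int := PySem.Dict.getD ⟨p⟩ k 0

def pvStepA (acc : Int × (List (String × Int)) × Int) (predmet : List (String × Int)) :
    Int × (List (String × Int)) × Int :=
  let ukupna := acc.1 + pvGet predmet "tezina"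
  if acc.2.2 < pvGet predmet "vrijednost" then
    (ukupna, predmet, pvGet predmet "vrijednost")
  else
    (ukupna, acc.2)

def izracunaj_inventar (lista_predmeta : List (List (String × Int))) : Int × (List (String × Int)) :=
  let najvrijedniji := PySem.List.pyGetD lista_predmeta 0 []
  let max_vrijednost := pvGet najvrijedniji "vrijednost"
  let s := lista_predmeta.foldl pvStepA (0, najvrijedniji, max_vrijednost)
  (s.1, s.2.1)

-- ===== PORT B =====
-- l[:mid] / l[mid:] with 0 ≤ mid ≤ len(l) are exactly List.take mid / List.drop mid
def izracunaj_inventar_alt (lista_predmeta : List (List (String × Int))) : Int × (List (String × Int)) :=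
  if lista_predmeta.length ≤ 1 then
    let p := PySem.List.pyGetD lista_predmeta 0 []
    (pvGet p "tezina", p)
  else
    let mid := lista_predmeta.length / 2
    let r1 := izracunaj_inventar_alt (lista_predmeta.take mid)
    let r2 := izracunaj_inventar_alt (lista_predmeta.drop mid)
    (r1.1 + r2.1,
      if pvGet r1.2 "vrijednost" < pvGet r2.2 "vrijednost" then r2.2 else r1.2)
termination_by lista_predmeta.length
decreasing_by
  · simp only [List.length_take]; omega
  · simp only [List.length_drop]; omega

-- ===== PRECONDITION & SPEC =====
-- Pre_ excludes the empty list (A raises IndexError) and items missing the key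
-- "tezina" or "vrijednost" (A raises KeyError); A returns on no other inputs.
def Pre_izracunaj_inventar (lista_predmeta : List (List (String × Int))) : Prop :=
  lista_predmeta ≠ [] ∧
  ∀ p ∈ lista_predmeta, "tezina" ∈ p.map Prod.fst ∧ "vrijednost" ∈ p.map Prod.fst
instance (lista_predmeta : List (List (String × Int))) : Decidable (Pre_izracunaj_inventar lista_predmeta) := by unfold Pre_izracunaj_inventar; infer_instance

def pvWitness_izracunaj_inventar : (List (List (String × Int))) :=
  [[("tezina", 3), ("vrijednost", 10)], [("tezina", 1), ("vrijednost", 10)]]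

def Spec_izracunaj_inventar (lista_predmeta : List (List (String × Int))) (out : Int × (List (String × Int))) : Prop := out = izracunaj_inventar_alt lista_predmeta
instance (lista_predmeta : List (List (String × Int))) (out : Int × (List (String × Int))) : Decidable (Spec_izracunaj_inventar lista_predmeta out) := by unfold Spec_izracunaj_inventar; infer_instance

-- ===== CLAIM (what is proved, stated in full; the proofs are below) =====
def Claim_equal_izracunaj_inventar : Prop := ∀ (lista_predmeta : List (List (String × Int))), Dom_izracunaj_inventar lista_predmeta → Pre_izracunaj_inventar lista_predmeta → Spec_izracunaj_inventar lista_predmeta (izracunaj_inventar lista_predmeta)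

-- ===== LEMMAS AND PROOFS =====

-- the merge of two bests: first (left-biased) maximum by "vrijednost"
def pvBest (m p : List (String × Int)) : List (String × Int) :=
  if pvGet m "vrijednost" < pvGet p "vrijednost" then p else m

lemma pvBest_assoc (a b c : List (String × Int)) :
    pvBest (pvBest a b) c = pvBest a (pvBest b c) := by
  unfold pvBest; split_ifs <;> first | rfl | omega

lemma foldl_pvBest_pull (t : List (List (String × Int))) :
    ∀ a b, t.foldl pvBest (pvBest a b) = pvBest a (t.foldl pvBest b) := by
  induction t with
  | nil => intro a b; rfl
  | cons h t ih => intro a b; simp only [List.foldl_cons, pvBest_assoc, ih]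

-- A's fold, started at any (t0, m0, value of m0), computes t0 + Σ weights and the running first-max
lemma pvFoldA (l : List (List (String × Int))) :
    ∀ (t0 : Int) (m0 : List (String × Int)),
      l.foldl pvStepA (t0, m0, pvGet m0 "vrijednost")
      = (t0 + (l.map (fun p => pvGet p "tezina")).sum,
         l.foldl pvBest m0,
         pvGet (l.foldl pvBest m0) "vrijednost") := by
  induction l with
  | nil => intro t0 m0; simp
  | cons h t ih =>
    intro t0 m0
    simp only [List.foldl_cons, List.map_cons, List.sum_cons]
    by_cases hc : pvGet m0 "vrijednost" < pvGet h "vrijednost"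
    · simp only [pvStepA, hc, if_pos, pvBest, ih]
      ring_nf
    · simp only [pvStepA, pvBest, hc, if_false]
      rw [ih]
      ring_nf

-- B's divide-and-conquer on a nonempty list computes the weight sum and the same running first-max
lemma pvAltChar : ∀ (n : Nat) (h : List (String × Int)) (t : List (List (String × Int))),
    (h :: t).length ≤ n →
    izracunaj_inventar_alt (h :: t)
      = (((h :: t).map (fun p => pvGet p "tezina")).sum, t.foldl pvBest h) := by
  intro n
  induction n with
  | zero => intro h t hle; simp at hle
  | succ n ih =>
    intro h t hle
    rw [izracunaj_inventar_alt]
    by_cases h1 : (h :: t).length ≤ 1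
    · have : t = [] := by
        cases t with
        | nil => rfl
        | cons a b => simp at h1
      subst this
      simp [PySem.List.pyGetD]
    · simp only [h1, if_false]
      set mid := (h :: t).length / 2 with hmid
      have hcons : (h :: t).length = t.length + 1 := by simp
      have hlen : 2 ≤ (h :: t).length := by omega
      have hm1 : 1 ≤ mid := by omega
      have hm2 : mid < (h :: t).length := by omega
      obtain ⟨h1', t1', hTake⟩ : ∃ a b, (h :: t).take mid = a :: b := by
        cases hE : (h :: t).take mid with
        | nil => exfalso; have := congrArg List.length hE; simp at this; omega
        | cons a b => exact ⟨a, b, rfl⟩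
      obtain ⟨h2', t2', hDrop⟩ : ∃ a b, (h :: t).drop mid = a :: b := by
        cases hE : (h :: t).drop mid with
        | nil => exfalso; have := congrArg List.length hE; simp at this; omega
        | cons a b => exact ⟨a, b, rfl⟩
      have hlen1 : (h1' :: t1').length ≤ n := by
        have hT : ((h :: t).take mid).length = (h1' :: t1').length := by rw [hTake]
        rw [List.length_take] at hT; omega
      have hlen2 : (h2' :: t2').length ≤ n := by
        have hD : ((h :: t).drop mid).length = (h2' :: t2').length := by rw [hDrop]
        rw [List.length_drop] at hD; omega
      rw [hTake, hDrop, ih _ _ hlen1, ih _ _ hlen2]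
      have happ : (h1' :: t1') ++ (h2' :: t2') = h :: t := by
        rw [← hTake, ← hDrop, List.take_append_drop]
      have hsum : ((h :: t).map (fun p => pvGet p "tezina")).sum
          = ((h1' :: t1').map (fun p => pvGet p "tezina")).sum
            + ((h2' :: t2').map (fun p => pvGet p "tezina")).sum := by
        rw [← happ, List.map_append, List.sum_append]
      have hbest : t.foldl pvBest h
          = pvBest (t1'.foldl pvBest h1') (t2'.foldl pvBest h2') := by
        have : (h :: t) = h1' :: (t1' ++ h2' :: t2') := by
          rw [← happ]; rfl
        injection this with hh ht
        subst hh; subst ht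
        rw [List.foldl_append, List.foldl_cons, foldl_pvBest_pull]
      rw [hsum, hbest]
      rfl

-- ===== VERDICT (by name: the statement is the Claim_ definition above) =====
theorem izracunaj_inventar_spec : Claim_equal_izracunaj_inventar := by
  intro l _ hpre
  obtain ⟨hne, -⟩ := hpre
  obtain ⟨h, t, rfl⟩ := List.exists_cons_of_ne_nil hne
  show izracunaj_inventar (h :: t) = izracunaj_inventar_alt (h :: t)
  rw [pvAltChar (h :: t).length h t le_rfl]
  simp only [izracunaj_inventar, PySem.List.pyGetD_zero_cons, List.foldl_cons]
  rw [show pvStepA (0, h, pvGet h "vrijednost") h = (pvGet h "tezina", h, pvGet h "vrijednost") by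
    simp [pvStepA]]
  rw [pvFoldA t (pvGet h "tezina") h]
  simp
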